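-- pv_equiv track=rewrite | github.com/tjrdbfl/Algorithm2 | midterm/backtracking/boardcover/boardcover2.py | generated_rotation
-- ===== SOURCE A (Python) =====
-- def rotate(block):
--     return list(zip(*reversed(block)))
--
-- def generated_rotation(block):
--     rotations=[[] for _ in range(4)]
--     for rot in range(4):
--         originY=originX=-1
--         for i in range(len(block)):
--             for j in range(len(block[0])):
--                 if block[i][j]==1:
--                     if originY==-1:
--                         originY,originX=i,j
--                     rotations[rot].append((i-originY,j-originX))
--
--         block=rotate(block)
--
--     blocks={tuple(block) for block in rotations}
--     return list(blocks)
-- ===== SOURCE B (Python) =====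
-- def generated_rotation(block):
--     h = len(block)
--     w = len(block[0]) if block else 0
--     cells = [(i, j) for i in range(h) for j in range(w) if block[i][j] == 1]
--     shapes = []
--     for _ in range(4):
--         cells.sort()
--         oy, ox = cells[0] if cells else (0, 0)
--         shapes.append(tuple((i - oy, j - ox) for i, j in cells))
--         cells = [(j, h - 1 - i) for i, j in cells]
--         h, w = w, h
--     return list(set(shapes))
-- ===== Notes on version B (the rewrite author's own statement) =====
-- stated objective: alternative
-- what changed: B extracts the 1-cell coordinates once and produces each rotation sparsely by a coordinate map plus a lexicographic sort, instead of A's rebuilding the whole grid with zip(*reversed(...)) and rescanning it cell by cell for every rotation.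
import Mathlib
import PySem

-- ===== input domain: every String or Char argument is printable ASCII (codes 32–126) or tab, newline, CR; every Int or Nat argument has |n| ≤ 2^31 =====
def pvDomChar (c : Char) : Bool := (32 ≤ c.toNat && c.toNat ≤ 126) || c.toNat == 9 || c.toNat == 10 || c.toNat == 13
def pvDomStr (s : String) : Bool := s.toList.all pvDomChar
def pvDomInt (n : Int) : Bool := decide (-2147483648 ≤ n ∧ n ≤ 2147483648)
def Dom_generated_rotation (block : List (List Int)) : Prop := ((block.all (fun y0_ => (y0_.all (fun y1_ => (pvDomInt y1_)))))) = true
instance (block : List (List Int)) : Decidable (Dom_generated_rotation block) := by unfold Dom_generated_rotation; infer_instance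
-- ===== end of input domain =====

-- B extracts the 1-cell coordinates once and produces each rotation sparsely (coordinate map + lexicographic
-- sort), instead of A's rebuilding the whole grid with zip(*reversed(...)) and rescanning it each time.
-- Python returns list(set(...)): CPython's set iteration order is not modelled; outputs are compared as sets,
-- both ports return the deduplicated shapes in first-occurrence order.

-- ===== PORT A =====
-- zip(*reversed(block)): zip of the reversed rows, truncating at the first exhausted row
def pvZipStar (ls : List (List Int)) : List (List Int) :=
  if h : ls.isEmpty = true ∨ ls.any List.isEmpty = true then []
  else (ls.map (fun r => r.headD 0)) :: pvZipStar (ls.map List.tail)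
termination_by (ls.headD []).length
decreasing_by
  rw [not_or] at h
  obtain ⟨h1, h2⟩ := h
  cases ls with
  | nil => simp at h1
  | cons x t =>
      cases x with
      | nil => simp at h2
      | cons a xs => simp

def pvRotate (block : List (List Int)) : List (List Int) := pvZipStar block.reverse

-- the body of A's innermost loop: state = (originY, originX, rotations[rot])
def pvStepJ (b : List (List Int)) (i j : Int) (st : Int × Int × List (Int × Int)) :
    Int × Int × List (Int × Int) :=
  if PySem.List.pyGetD (PySem.List.pyGetD b i []) j 0 = 1 then
    let oY := if st.1 = -1 then i else st.1
    let oX := if st.1 = -1 then j else st.2.1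
    (oY, oX, st.2.2 ++ [(i - oY, j - oX)])
  else st

-- A's double scan for one rotation (len(block) rows, len(block[0]) columns; block[0] only reached when rows exist)
def pvScanA (b : List (List Int)) : Int × Int × List (Int × Int) :=
  (PySem.List.pyRange 0 (b.length : Int)).foldl
    (fun st i =>
      (PySem.List.pyRange 0 (((b.headD []).length : Nat) : Int)).foldl
        (fun st j => pvStepJ b i j st) st)
    (-1, -1, [])

def generated_rotation (block : List (List Int)) : List (List (Int × Int)) :=
  let rotations :=
    ((PySem.List.pyRange 0 4).foldl
      (fun (st : List (List (Int × Int)) × List (List Int)) _rot =>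
        (st.1 ++ [(pvScanA st.2).2.2], pvRotate st.2))
      ([], block)).1
  PySem.Set.ofList rotations

-- ===== PORT B =====
-- [(i, j) for i in range(h) for j in range(w) if block[i][j] == 1]
def pvCellsB (block : List (List Int)) (h w : Int) : List (Int × Int) :=
  (PySem.List.pyRange 0 h).flatMap (fun i =>
    (PySem.List.pyRange 0 w).filterMap (fun j =>
      if PySem.List.pyGetD (PySem.List.pyGetD block i []) j 0 = 1 then some (i, j) else none))

-- one iteration of B's loop; state = (shapes, cells, h, w); Python's tuple sort is
-- lexicographic, ported exactly via the key 'toLex'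
def pvStepB (st : List (List (Int × Int)) × List (Int × Int) × Int × Int) :
    List (List (Int × Int)) × List (Int × Int) × Int × Int :=
  let sc := PySem.List.sorted st.2.1 (fun p => toLex p)
  let o := if sc.isEmpty then ((0 : Int), (0 : Int)) else sc.headD (0, 0)
  (st.1 ++ [sc.map (fun q => (q.1 - o.1, q.2 - o.2))],
   sc.map (fun q => (q.2, st.2.2.1 - 1 - q.1)),
   st.2.2.2, st.2.2.1)

def generated_rotation_alt (block : List (List Int)) : List (List (Int × Int)) :=
  let h : Int := (block.length : Int)
  let w : Int := if block.isEmpty then 0 else ((block.headD []).length : Int)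
  let cells := pvCellsB block h w
  let shapes := ((PySem.List.pyRange 0 4).foldl (fun st _ => pvStepB st) ([], cells, h, w)).1
  PySem.Set.ofList shapes

-- ===== PRECONDITION & SPEC =====
-- A raises IndexError exactly when some row is shorter than row 0 (the scan reads block[i][j]
-- for every j < len(block[0])); Pre_ excludes exactly those inputs.
def Pre_generated_rotation (block : List (List Int)) : Prop :=
  ∀ row ∈ block, (block.headD []).length ≤ row.length
instance (block : List (List Int)) : Decidable (Pre_generated_rotation block) := by
  unfold Pre_generated_rotation; infer_instance

def pvWitness_generated_rotation : List (List Int) := [[1, 0], [1, 1]]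

def Spec_generated_rotation (block : List (List Int)) (out : List (List (Int × Int))) : Prop :=
  out = generated_rotation_alt block
instance (block : List (List Int)) (out : List (List (Int × Int))) :
    Decidable (Spec_generated_rotation block out) := by unfold Spec_generated_rotation; infer_instance

-- ===== CLAIM (what is proved, stated in full; the proofs are below) =====
def Claim_equal_generated_rotation : Prop :=
  ∀ (block : List (List Int)), Dom_generated_rotation block → Pre_generated_rotation block →
    Spec_generated_rotation block (generated_rotation block)

-- ===== LEMMAS AND PROOFS =====

-- proof-side vocabulary: the 1-cells of a grid in row-major order
def pvEntry (b : List (List Int)) (i j : Nat) : Int := (b.getD i []).getD j 0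

def pvRowCells (b : List (List Int)) (w i : Nat) : List (Int × Int) :=
  (List.range w).filterMap (fun j => if pvEntry b i j = 1 then some ((i : Int), (j : Int)) else none)

def pvCellsAt (b : List (List Int)) (w : Nat) : List (Int × Int) :=
  (List.range b.length).flatMap (pvRowCells b w)

def pvCellsOf (b : List (List Int)) : List (Int × Int) := pvCellsAt b (b.headD []).length

def pvOffsets : List (Int × Int) → List (Int × Int)
  | [] => []
  | p :: rest => (p :: rest).map (fun q => (q.1 - p.1, q.2 - p.2))

def pvF (h : Int) (p : Int × Int) : Int × Int := (p.2, h - 1 - p.1)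

-- B-loop invariant
def pvInv (g : List (List Int)) (c : List (Int × Int)) (hh ww : Int) : Prop :=
  Pre_generated_rotation g ∧ c.Perm (pvCellsOf g) ∧
    (pvCellsOf g ≠ [] → hh = (g.length : Int) ∧ ww = (((g.headD []).length : Nat) : Int))

lemma pv_mem_rowCells {b : List (List Int)} {w i : Nat} {x : Int × Int} :
    x ∈ pvRowCells b w i ↔ ∃ j, j < w ∧ pvEntry b i j = 1 ∧ x = ((i : Int), (j : Int)) := by
  constructor
  · intro hx
    simp only [pvRowCells, List.mem_filterMap, List.mem_range] at hx
    obtain ⟨j, hj, heq⟩ := hx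
    by_cases hE : pvEntry b i j = 1
    · simp only [hE, if_pos, Option.some.injEq] at heq
      exact ⟨j, hj, hE, heq.symm⟩
    · simp [hE] at heq
  · rintro ⟨j, hj, hE, rfl⟩
    simp only [pvRowCells, List.mem_filterMap, List.mem_range]
    exact ⟨j, hj, by simp [hE]⟩

lemma pv_mem_cellsAt {b : List (List Int)} {w : Nat} {x : Int × Int} :
    x ∈ pvCellsAt b w ↔
      ∃ i, i < b.length ∧ ∃ j, j < w ∧ pvEntry b i j = 1 ∧ x = ((i : Int), (j : Int)) := by
  simp only [pvCellsAt, List.mem_flatMap, List.mem_range]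
  constructor
  · rintro ⟨i, hi, hx⟩
    obtain ⟨j, hj, hE, rfl⟩ := pv_mem_rowCells.mp hx
    exact ⟨i, hi, j, hj, hE, rfl⟩
  · rintro ⟨i, hi, j, hj, hE, rfl⟩
    exact ⟨i, hi, pv_mem_rowCells.mpr ⟨j, hj, hE, rfl⟩⟩

lemma pv_pairwise_cellsAt (b : List (List Int)) (w : Nat) :
    (pvCellsAt b w).Pairwise (fun p q => (fun p => toLex p) p < (fun p => toLex p) q) := by
  have hrow : ∀ i, (pvRowCells b w i).Pairwise (fun p q => toLex p < toLex q) := by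
    intro i
    refine List.Pairwise.filterMap _ ?_ List.pairwise_lt_range
    intro a a' haa p hp q hq
    have hpa : p = ((i : Int), (a : Int)) := by
      by_cases h : pvEntry b i a = 1
      · simp only [h, if_pos, Option.some.injEq] at hp; exact hp.symm
      · simp [h] at hp
    have hqa : q = ((i : Int), (a' : Int)) := by
      by_cases h : pvEntry b i a' = 1
      · simp only [h, if_pos, Option.some.injEq] at hq; exact hq.symm
      · simp [h] at hq
    subst hpa; subst hqa
    rw [Prod.Lex.toLex_lt_toLex]
    exact Or.inr ⟨rfl, by simpa using haa⟩
  rw [pvCellsAt, List.flatMap_def, List.pairwise_flatten]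
  refine ⟨?_, ?_⟩
  · intro l hl
    obtain ⟨i, _, rfl⟩ := List.mem_map.mp hl
    exact hrow i
  · rw [List.pairwise_map]
    refine List.Pairwise.imp ?_ List.pairwise_lt_range
    intro a a' haa x hx y hy
    obtain ⟨j, -, -, rfl⟩ := pv_mem_rowCells.mp hx
    obtain ⟨j', -, -, rfl⟩ := pv_mem_rowCells.mp hy
    rw [Prod.Lex.toLex_lt_toLex]
    exact Or.inl (by simpa using haa)

lemma pv_nodup_cellsAt (b : List (List Int)) (w : Nat) : (pvCellsAt b w).Nodup := by
  refine (pv_pairwise_cellsAt b w).imp ?_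
  intro p q h heq
  subst heq
  exact lt_irrefl _ h

lemma pv_sorted_cells {g : List (List Int)} {w : Nat} {c : List (Int × Int)}
    (hperm : c.Perm (pvCellsAt g w)) :
    PySem.List.sorted c (fun p => toLex p) = pvCellsAt g w :=
  PySem.List.sorted_eq_of_perm_of_pairwise_lt c (pvCellsAt g w) (fun p => toLex p)
    hperm.symm (pv_pairwise_cellsAt g w)

lemma pv_rowCells_succ (b : List (List Int)) (i w : Nat) :
    pvRowCells b (w + 1) i = pvRowCells b w i ++
      (if pvEntry b i w = 1 then [((i : Int), (w : Int))] else []) := by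
  rw [pvRowCells, pvRowCells, List.range_succ, List.filterMap_append]
  by_cases hE : pvEntry b i w = 1 <;> simp [hE]

lemma pvF_injective (h : Int) : Function.Injective (pvF h) := by
  intro p q hpq
  simp only [pvF, Prod.mk.injEq] at hpq
  obtain ⟨h1, h2⟩ := hpq
  exact Prod.ext (by omega) h1

lemma pv_grid_head {b : List (List Int)} (hw : 0 < (b.headD []).length) :
    (((List.range (b.headD []).length).map
        (fun i => b.reverse.map (fun r => r.getD i 0))).headD []).length = b.length := by
  cases h : (b.headD []).length with
  | zero => omega
  | succ n => rw [List.range_succ_eq_map]; simp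

lemma pv_rotate_eq_nil_of_w0 {b : List (List Int)} (hb : b ≠ [])
    (hw : (b.headD []).length = 0) : pvRotate b = [] := by
  unfold pvRotate
  rw [pvZipStar]
  apply dif_pos
  right
  rw [List.any_eq_true]
  refine ⟨b.headD [], ?_, ?_⟩
  · rw [List.mem_reverse]
    cases b with
    | nil => exact absurd rfl hb
    | cons x t => exact List.mem_cons_self
  · simp only [List.isEmpty_iff]
    exact List.eq_nil_of_length_eq_zero hw

lemma pvZipStar_nil : pvZipStar [] = [] := by
  rw [pvZipStar]; simp

lemma pvZipStar_spec (w : Nat) :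
    ∀ (ls : List (List Int)), (∀ r ∈ ls, w ≤ r.length) → (∃ r ∈ ls, r.length = w) →
      pvZipStar ls = (List.range w).map (fun i => ls.map (fun r => r.getD i 0)) := by
  induction w with
  | zero =>
    rintro ls hall ⟨r, hr, hrlen⟩
    have hre : r = [] := List.eq_nil_of_length_eq_zero hrlen
    rw [pvZipStar]
    have : ls.any List.isEmpty = true := by
      rw [List.any_eq_true]
      exact ⟨r, hr, by simp [hre]⟩
    simp [this]
  | succ w ih =>
    rintro ls hall ⟨r0, hr0, hr0len⟩
    have hne : ls ≠ [] := by rintro rfl; exact absurd hr0 (List.not_mem_nil)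
    have hnoempty : ls.any List.isEmpty = false := by
      rw [List.any_eq_false]
      intro r hr
      have := hall r hr
      simp only [List.isEmpty_iff]
      intro hcon
      rw [hcon] at this
      simp at this
    rw [pvZipStar, dif_neg (by simp [hne, hnoempty])]
    rw [ih (ls.map List.tail) ?tails ?ex]
    case tails =>
      intro r hr
      obtain ⟨s, hs, rfl⟩ := List.mem_map.mp hr
      have := hall s hs
      rw [List.length_tail]
      omega
    case ex =>
      refine ⟨r0.tail, List.mem_map_of_mem hr0, ?_⟩
      rw [List.length_tail, hr0len]
      omega
    rw [List.range_succ_eq_map, List.map_cons, List.map_map]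
    congr 1
    · apply List.map_congr_left
      intro r _
      cases r <;> rfl
    · apply List.map_congr_left
      intro i _
      simp only [Function.comp_apply]
      rw [List.map_map]
      apply List.map_congr_left
      intro r _
      cases r <;> rfl

lemma pvRotate_spec {b : List (List Int)} (hb : b ≠ [])
    (hpre : Pre_generated_rotation b) :
    pvRotate b =
      (List.range (b.headD []).length).map (fun i => b.reverse.map (fun r => r.getD i 0)) := by
  unfold pvRotate
  apply pvZipStar_spec
  · intro r hr
    exact hpre r (List.mem_reverse.mp hr)
  · obtain ⟨x, t, rfl⟩ := List.exists_cons_of_ne_nil hb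
    refine ⟨x, List.mem_reverse.mpr List.mem_cons_self, rfl⟩

lemma pv_cellsAt_zero (b : List (List Int)) : pvCellsAt b 0 = [] := by
  simp [pvCellsAt, pvRowCells]

lemma pv_rot_facts {b : List (List Int)} (hpre : Pre_generated_rotation b)
    (hne : pvCellsOf b ≠ []) :
    (pvRotate b).length = (b.headD []).length ∧
      ((pvRotate b).headD []).length = b.length := by
  obtain ⟨x, hxmem⟩ : ∃ x, x ∈ pvCellsOf b := List.exists_mem_of_ne_nil _ hne
  obtain ⟨i, hi, j, hj, -, -⟩ := pv_mem_cellsAt.mp hxmem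
  have hb : b ≠ [] := by rintro rfl; simp at hi
  have hw : 0 < (b.headD []).length := Nat.pos_of_ne_zero (by omega)
  rw [pvRotate_spec hb hpre]
  refine ⟨by simp, ?_⟩
  exact pv_grid_head hw

lemma pv_pre_rotate {b : List (List Int)} (hpre : Pre_generated_rotation b) :
    Pre_generated_rotation (pvRotate b) := by
  by_cases hb : b = []
  · subst hb
    intro r hr
    simp [pvRotate, pvZipStar_nil] at hr
  by_cases hw : (b.headD []).length = 0
  · have hrot : pvRotate b = [] := pv_rotate_eq_nil_of_w0 hb hw
    intro r hr
    rw [hrot] at hr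
    simp at hr
  · rw [pvRotate_spec hb hpre]
    intro r hr
    obtain ⟨i, -, rfl⟩ := List.mem_map.mp hr
    rw [pv_grid_head (Nat.pos_of_ne_zero hw)]
    simp

lemma pv_rot_cells_perm {b : List (List Int)} (hpre : Pre_generated_rotation b) :
    ((pvCellsOf b).map (pvF (b.length : Int))).Perm (pvCellsOf (pvRotate b)) := by
  by_cases hb : b = []
  · subst hb
    simp [pvCellsOf, pvCellsAt, pvRotate, pvZipStar_nil]
  by_cases hw : (b.headD []).length = 0
  · have h1 : pvCellsOf b = [] := by rw [pvCellsOf, hw, pv_cellsAt_zero]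
    have h2 : pvRotate b = [] := pv_rotate_eq_nil_of_w0 hb hw
    rw [h1, h2]
    simp [pvCellsOf, pvCellsAt]
  · have hwpos : 0 < (b.headD []).length := Nat.pos_of_ne_zero hw
    have hrot := pvRotate_spec hb hpre
    have hlen : (pvRotate b).length = (b.headD []).length := by rw [hrot]; simp
    have hhead : ((pvRotate b).headD []).length = b.length := by
      rw [hrot]; exact pv_grid_head hwpos
    have hentry : ∀ i j, i < (b.headD []).length → j < b.length →
        pvEntry (pvRotate b) i j = pvEntry b (b.length - 1 - j) i := by
      intro i j hi hj
      rw [hrot]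
      unfold pvEntry
      rw [PySem.List.getD_map_range _ _ _ _ hi]
      rw [List.getD_eq_getElem?_getD, List.getElem?_map,
        List.getElem?_reverse (by simpa using hj)]
      have hj' : b.length - 1 - j < b.length := by omega
      rw [List.getElem?_eq_getElem hj']
      simp [List.getD_eq_getElem?_getD, List.getElem?_eq_getElem hj']
    refine (List.perm_ext_iff_of_nodup
      (List.Nodup.map (pvF_injective _) (pv_nodup_cellsAt b _))
      (pv_nodup_cellsAt _ _)).mpr ?_
    intro x
    rw [List.mem_map]
    constructor
    · rintro ⟨p, hp, rfl⟩
      obtain ⟨r, hr, c, hc, hE, rfl⟩ := pv_mem_cellsAt.mp hp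
      refine pv_mem_cellsAt.mpr ⟨c, ?_, b.length - 1 - r, ?_, ?_, ?_⟩
      · rw [hlen]; omega
      · rw [hhead]; omega
      · rw [hentry c (b.length - 1 - r) hc (by omega)]
        have hrr : b.length - 1 - (b.length - 1 - r) = r := by omega
        rw [hrr]
        exact hE
      · simp only [pvF]
        have hc1 : ((b.length - 1 - r : Nat) : Int) = (b.length : Int) - 1 - (r : Int) := by
          omega
        rw [hc1]
    · intro hx
      obtain ⟨i, hi, j, hj, hE, rfl⟩ := pv_mem_cellsAt.mp hx
      rw [hlen] at hi
      rw [hhead] at hj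
      refine ⟨(((b.length - 1 - j : Nat) : Int), ((i : Nat) : Int)), ?_, ?_⟩
      · refine pv_mem_cellsAt.mpr ⟨b.length - 1 - j, by omega, i, hi, ?_, rfl⟩
        rw [← hentry i j hi hj]
        exact hE
      · simp only [pvF]
        have hc1 : ((b.length - 1 - j : Nat) : Int) = (b.length : Int) - 1 - (j : Int) := by
          omega
        rw [hc1]
        simp only [Prod.mk.injEq]
        exact ⟨by trivial, by omega⟩

-- ===== A-side scan characterisation =====

def pvInnF (b : List (List Int)) (i w : Nat) (st : Int × Int × List (Int × Int)) :
    Int × Int × List (Int × Int) :=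
  (List.range w).foldl (fun st (j : Nat) => pvStepJ b (i : Int) (j : Int) st) st

def pvOutF (b : List (List Int)) (w n : Nat) : Int × Int × List (Int × Int) :=
  (List.range n).foldl (fun st i => pvInnF b i w st) (-1, -1, [])

lemma pv_innF_found (b : List (List Int)) (i w : Nat) (st : Int × Int × List (Int × Int))
    (hY : st.1 ≠ -1) :
    pvInnF b i w st =
      (st.1, st.2.1, st.2.2 ++ (pvRowCells b w i).map (fun q => (q.1 - st.1, q.2 - st.2.1))) := by
  induction w with
  | zero => simp [pvInnF, pvRowCells]
  | succ w ih =>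
    rw [pvInnF, List.range_succ, List.foldl_append]
    have hpre : (List.range w).foldl (fun st (j : Nat) => pvStepJ b (i : Int) (j : Int) st) st =
        pvInnF b i w st := rfl
    rw [hpre, ih]
    simp only [List.foldl_cons, List.foldl_nil]
    rw [pv_rowCells_succ]
    rw [pvStepJ]
    simp only [PySem.List.pyGetD_natCast]
    by_cases hE : pvEntry b i w = 1
    · rw [if_pos (by exact hE)]
      simp [hY, hE, List.map_append, List.append_assoc]
    · rw [if_neg (by exact hE)]
      simp [hE]

lemma pv_innF_unfound (b : List (List Int)) (i w : Nat) (acc : List (Int × Int)) :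
    pvInnF b i w (-1, -1, acc) =
      match pvRowCells b w i with
      | [] => (-1, -1, acc)
      | p :: rest => (p.1, p.2, acc ++ pvOffsets (p :: rest)) := by
  induction w with
  | zero => simp [pvInnF, pvRowCells]
  | succ w ih =>
    rw [pvInnF, List.range_succ, List.foldl_append]
    have hpre : (List.range w).foldl (fun st (j : Nat) => pvStepJ b (i : Int) (j : Int) st)
        (-1, -1, acc) = pvInnF b i w (-1, -1, acc) := rfl
    rw [hpre, ih]
    simp only [List.foldl_cons, List.foldl_nil]
    rw [pv_rowCells_succ]
    cases h : pvRowCells b w i with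
    | nil =>
      simp only [List.nil_append]
      rw [pvStepJ]
      simp only [PySem.List.pyGetD_natCast]
      by_cases hE : pvEntry b i w = 1
      · rw [if_pos (by exact hE)]
        simp [hE, pvOffsets]
      · rw [if_neg (by exact hE)]
        simp [hE]
    | cons p rest =>
      have hpmem : p ∈ pvRowCells b w i := by rw [h]; exact List.mem_cons_self
      obtain ⟨j0, -, -, hpq⟩ := pv_mem_rowCells.mp hpmem
      have hp1 : p.1 ≠ -1 := by rw [hpq]; simp
      rw [pvStepJ]
      simp only [PySem.List.pyGetD_natCast]
      by_cases hE : pvEntry b i w = 1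
      · rw [if_pos (by exact hE)]
        simp only [hp1, if_neg]
        rw [List.cons_append]
        simp [pvOffsets, hE, List.map_append, List.append_assoc, hp1]
      · rw [if_neg (by exact hE)]
        simp [hE]

lemma pv_outF_spec (b : List (List Int)) (w n : Nat) :
    pvOutF b w n =
      match (List.range n).flatMap (pvRowCells b w) with
      | [] => (-1, -1, [])
      | p :: rest => (p.1, p.2, pvOffsets (p :: rest)) := by
  induction n with
  | zero => simp [pvOutF]
  | succ n ih =>
    rw [pvOutF, List.range_succ, List.foldl_append]
    have hpre : (List.range n).foldl (fun st i => pvInnF b i w st) (-1, -1, []) =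
        pvOutF b w n := rfl
    rw [hpre, ih]
    simp only [List.foldl_cons, List.foldl_nil]
    rw [List.flatMap_append, List.flatMap_cons, List.flatMap_nil, List.append_nil]
    cases h : (List.range n).flatMap (pvRowCells b w) with
    | nil =>
      simp only [List.nil_append]
      rw [pv_innF_unfound]
      cases h2 : pvRowCells b w n <;> simp
    | cons p rest =>
      have hpmem : p ∈ (List.range n).flatMap (pvRowCells b w) := by
        rw [h]; exact List.mem_cons_self
      obtain ⟨i0, -, hpi⟩ := List.mem_flatMap.mp hpmem
      obtain ⟨j0, -, -, hpq⟩ := pv_mem_rowCells.mp hpi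
      have hp1 : (p.1, p.2, pvOffsets (p :: rest)).1 ≠ -1 := by
        simp only [hpq]; simp
      rw [pv_innF_found _ _ _ _ hp1]
      rw [List.cons_append]
      simp [pvOffsets, List.map_append]

lemma pv_scanA_eq (b : List (List Int)) :
    (pvScanA b).2.2 = pvOffsets (pvCellsOf b) := by
  rw [pvScanA]
  simp only [PySem.List.pyRange_zero_natCast, List.foldl_map]
  have hout : (List.range b.length).foldl
      (fun st (i : Nat) => (List.range (b.headD []).length).foldl
        (fun st (j : Nat) => pvStepJ b (i : Int) (j : Int) st) st) (-1, -1, []) =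
      pvOutF b (b.headD []).length b.length := rfl
  rw [hout, pv_outF_spec]
  have hcells : (List.range b.length).flatMap (pvRowCells b (b.headD []).length) =
      pvCellsOf b := rfl
  rw [hcells]
  cases h : pvCellsOf b <;> simp [pvOffsets]

-- ===== B-side step =====

lemma pv_shape_eq (l : List (Int × Int)) :
    (l.map (fun q =>
        (q.1 - (if l.isEmpty then ((0 : Int), (0 : Int)) else l.headD (0, 0)).1,
         q.2 - (if l.isEmpty then ((0 : Int), (0 : Int)) else l.headD (0, 0)).2))) =
      pvOffsets l := by
  cases l <;> simp [pvOffsets]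

lemma pv_stepB_inv (g : List (List Int)) (shapes : List (List (Int × Int)))
    (c : List (Int × Int)) (hh ww : Int) (hinv : pvInv g c hh ww) :
    ∃ c', pvStepB (shapes, c, hh, ww) = (shapes ++ [(pvScanA g).2.2], c', ww, hh) ∧
      pvInv (pvRotate g) c' ww hh := by
  obtain ⟨hpre, hperm, hdim⟩ := hinv
  have hsc : PySem.List.sorted c (fun p => toLex p) = pvCellsOf g := pv_sorted_cells hperm
  refine ⟨(pvCellsOf g).map (fun q => (q.2, hh - 1 - q.1)), ?_, ?_, ?_, ?_⟩
  · simp only [pvStepB, hsc]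
    rw [pv_shape_eq, pv_scanA_eq]
  · exact pv_pre_rotate hpre
  · by_cases hc : pvCellsOf g = []
    · have hperm2 := pv_rot_cells_perm hpre
      rw [hc] at hperm2
      simp only [List.map_nil] at hperm2
      have h0 : pvCellsOf (pvRotate g) = [] := hperm2.symm.eq_nil
      rw [hc, h0]
      simp
    · obtain ⟨hh1, -⟩ := hdim hc
      rw [hh1]
      exact pv_rot_cells_perm hpre
  · intro hcr
    have hc : pvCellsOf g ≠ [] := by
      intro hc0
      have hperm2 := pv_rot_cells_perm hpre
      rw [hc0] at hperm2
      simp only [List.map_nil] at hperm2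
      exact hcr hperm2.symm.eq_nil
    obtain ⟨hh1, hw1⟩ := hdim hc
    obtain ⟨hl, hhd⟩ := pv_rot_facts hpre hc
    exact ⟨by rw [hw1, hl], by rw [hh1, hhd]⟩

lemma pv_base_cells (block : List (List Int)) :
    pvCellsB block (block.length : Int)
        (if block.isEmpty then 0 else ((block.headD []).length : Int)) =
      pvCellsOf block := by
  by_cases hb : block = []
  · subst hb
    decide
  · rw [if_neg (by simpa [List.isEmpty_iff] using hb)]
    rw [pvCellsB]
    simp only [PySem.List.pyRange_zero_natCast, List.flatMap_map, List.filterMap_map,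
      PySem.List.pyGetD_natCast, Function.comp]
    rfl

lemma pv_base_inv (block : List (List Int)) (hpre : Pre_generated_rotation block) :
    pvInv block (pvCellsOf block) (block.length : Int)
      (if block.isEmpty then 0 else (((block.headD []).length : Nat) : Int)) := by
  refine ⟨hpre, List.Perm.refl _, fun hne => ⟨rfl, ?_⟩⟩
  have hb : block ≠ [] := by rintro rfl; exact hne rfl
  rw [if_neg (by simpa [List.isEmpty_iff] using hb)]

-- ===== VERDICT (by name: the statement is the Claim_ definition above) =====
theorem generated_rotation_spec : Claim_equal_generated_rotation := by
  intro block _hdom hpre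
  unfold Spec_generated_rotation
  have h4 : PySem.List.pyRange 0 4 = [0, 1, 2, 3] := by decide
  have hA : generated_rotation block = PySem.Set.ofList
      [(pvScanA block).2.2, (pvScanA (pvRotate block)).2.2,
       (pvScanA (pvRotate (pvRotate block))).2.2,
       (pvScanA (pvRotate (pvRotate (pvRotate block)))).2.2] := by
    simp [generated_rotation, h4]
  obtain ⟨c1, e1, i1⟩ := pv_stepB_inv block [] (pvCellsOf block)
    ((block.length : Int)) (if block.isEmpty then 0 else (((block.headD []).length : Nat) : Int))
    (pv_base_inv block hpre)
  obtain ⟨c2, e2, i2⟩ := pv_stepB_inv (pvRotate block)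
    ([] ++ [(pvScanA block).2.2]) c1 _ _ i1
  obtain ⟨c3, e3, i3⟩ := pv_stepB_inv (pvRotate (pvRotate block))
    (([] ++ [(pvScanA block).2.2]) ++ [(pvScanA (pvRotate block)).2.2]) c2 _ _ i2
  obtain ⟨c4, e4, i4⟩ := pv_stepB_inv (pvRotate (pvRotate (pvRotate block)))
    ((([] ++ [(pvScanA block).2.2]) ++ [(pvScanA (pvRotate block)).2.2]) ++
      [(pvScanA (pvRotate (pvRotate block))).2.2]) c3 _ _ i3
  have hB : generated_rotation_alt block = PySem.Set.ofList
      [(pvScanA block).2.2, (pvScanA (pvRotate block)).2.2,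
       (pvScanA (pvRotate (pvRotate block))).2.2,
       (pvScanA (pvRotate (pvRotate (pvRotate block)))).2.2] := by
    simp only [generated_rotation_alt, h4, List.foldl_cons, List.foldl_nil]
    rw [pv_base_cells, e1, e2, e3, e4]
    simp
  rw [hA, hB]
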